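-- pv_equiv track=rewrite | github.com/JeremyYyc/Safescan_agent | backend/app/tools/video_tools.py | _infer_room_type
-- ===== SOURCE A (Python) =====
-- from typing import List, Tuple, Dict, Any
--
-- def _infer_room_type(objects: List[str]) -> str:
--     if not objects:
--         return "Unknown"
--     obj_set = {str(obj).lower() for obj in objects}
--     bathroom = {"toilet", "sink", "bathtub", "toothbrush", "hair drier"}
--     kitchen = {"microwave", "oven", "refrigerator", "sink", "toaster", "knife", "spoon", "fork"}
--     bedroom = {"bed"}
--     dining = {"dining table"}
--     living = {"couch", "sofa", "tv", "chair"}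
--     laundry = {"washing machine"}
--
--     if obj_set & bathroom:
--         return "Bathroom"
--     if obj_set & kitchen:
--         return "Kitchen"
--     if obj_set & bedroom:
--         return "Bedroom"
--     if obj_set & dining:
--         return "Dining Room"
--     if obj_set & living:
--         return "Living Room"
--     if obj_set & laundry:
--         return "Laundry"
--     return "Unknown"
-- ===== SOURCE B (Python) =====
-- from typing import List
--
-- # Each keyword is ranked by the highest-priority room it belongs to
-- # (sink belongs to Bathroom and Kitchen; Bathroom outranks Kitchen, so rank 0).
-- _RANK = {
--     "toilet": 0, "sink": 0, "bathtub": 0, "toothbrush": 0, "hair drier": 0,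
--     "microwave": 1, "oven": 1, "refrigerator": 1, "toaster": 1,
--     "knife": 1, "spoon": 1, "fork": 1,
--     "bed": 2,
--     "dining table": 3,
--     "couch": 4, "sofa": 4, "tv": 4, "chair": 4,
--     "washing machine": 5,
-- }
--
-- _ROOMS = ["Bathroom", "Kitchen", "Bedroom", "Dining Room", "Living Room", "Laundry", "Unknown"]
--
--
-- def _infer_room_type(objects: List[str]) -> str:
--     best = 6
--     for obj in objects:
--         best = min(best, _RANK.get(str(obj).lower(), 6))
--     return _ROOMS[best]
-- ===== Notes on version B (the rewrite author's own statement) =====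
-- stated objective: alternative
-- what changed: Replaces A's six set intersections and if-chain with a numeric min-reduction: each keyword carries the rank of its highest-priority room, one pass keeps the minimum rank seen, and the answer is an index into the room-name table (no sets, no intersection, no matched-room scan).
import Mathlib
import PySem

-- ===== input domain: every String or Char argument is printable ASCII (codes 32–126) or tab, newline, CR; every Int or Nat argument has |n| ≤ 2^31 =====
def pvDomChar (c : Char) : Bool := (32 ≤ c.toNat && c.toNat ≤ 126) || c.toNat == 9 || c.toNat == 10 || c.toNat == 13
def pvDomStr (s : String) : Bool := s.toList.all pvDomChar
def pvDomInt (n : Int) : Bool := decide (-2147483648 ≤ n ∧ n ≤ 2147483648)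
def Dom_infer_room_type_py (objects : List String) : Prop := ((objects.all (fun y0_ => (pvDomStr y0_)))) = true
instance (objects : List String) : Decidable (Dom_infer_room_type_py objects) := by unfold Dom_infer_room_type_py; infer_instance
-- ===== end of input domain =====

-- B replaces A's six set intersections and if-chain by a numeric min-reduction over
-- per-keyword priority ranks followed by one table index (alternative algorithm, same cost class).

-- ===== PORT A =====
def infer_room_type_py (objects : List String) : String :=
  if objects = [] then "Unknown"
  else
    let objSet : PySem.Set String := PySem.Set.ofList (objects.map PySem.Str.lower)
    let bathroom : PySem.Set String := PySem.Set.ofList ["toilet", "sink", "bathtub", "toothbrush", "hair drier"]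
    let kitchen : PySem.Set String := PySem.Set.ofList ["microwave", "oven", "refrigerator", "sink", "toaster", "knife", "spoon", "fork"]
    let bedroom : PySem.Set String := PySem.Set.ofList ["bed"]
    let dining : PySem.Set String := PySem.Set.ofList ["dining table"]
    let living : PySem.Set String := PySem.Set.ofList ["couch", "sofa", "tv", "chair"]
    let laundry : PySem.Set String := PySem.Set.ofList ["washing machine"]
    if PySem.Set.inter objSet bathroom ≠ [] then "Bathroom"
    else if PySem.Set.inter objSet kitchen ≠ [] then "Kitchen"
    else if PySem.Set.inter objSet bedroom ≠ [] then "Bedroom"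
    else if PySem.Set.inter objSet dining ≠ [] then "Dining Room"
    else if PySem.Set.inter objSet living ≠ [] then "Living Room"
    else if PySem.Set.inter objSet laundry ≠ [] then "Laundry"
    else "Unknown"

-- ===== PORT B =====
-- each keyword ranked by its highest-priority room (sink → 0, Bathroom outranks Kitchen)
def rankDict : PySem.Dict String Int :=
  PySem.Dict.ofList
  [("toilet", 0), ("sink", 0), ("bathtub", 0), ("toothbrush", 0), ("hair drier", 0),
   ("microwave", 1), ("oven", 1), ("refrigerator", 1), ("toaster", 1),
   ("knife", 1), ("spoon", 1), ("fork", 1),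
   ("bed", 2),
   ("dining table", 3),
   ("couch", 4), ("sofa", 4), ("tv", 4), ("chair", 4),
   ("washing machine", 5)]

def roomNames : List String :=
  ["Bathroom", "Kitchen", "Bedroom", "Dining Room", "Living Room", "Laundry", "Unknown"]

def infer_room_type_py_alt (objects : List String) : String :=
  let best : Int := objects.foldl (fun b o => min b (rankDict.getD (PySem.Str.lower o) 6)) 6
  -- best is always in [0, 6], so the index is in range and pyGet? returns some
  (PySem.List.pyGet? roomNames best).getD ""

-- ===== PRECONDITION & SPEC =====
def Spec_infer_room_type_py (objects : List String) (out : String) : Prop := out = infer_room_type_py_alt objects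
instance (objects : List String) (out : String) : Decidable (Spec_infer_room_type_py objects out) := by unfold Spec_infer_room_type_py; infer_instance

-- ===== CLAIM (what is proved, stated in full; the proofs are below) =====
def Claim_equal_infer_room_type_py : Prop := ∀ (objects : List String), Dom_infer_room_type_py objects → Spec_infer_room_type_py objects (infer_room_type_py objects)

-- ===== LEMMAS AND PROOFS =====

-- canonical form both ports are reduced to: first room (in priority order) with a keyword hit
def roomCanon (objects : List String) : String :=
  if ∃ o ∈ objects, PySem.Str.lower o ∈ (["toilet", "sink", "bathtub", "toothbrush", "hair drier"] : List String) then "Bathroom"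
  else if ∃ o ∈ objects, PySem.Str.lower o ∈ (["microwave", "oven", "refrigerator", "sink", "toaster", "knife", "spoon", "fork"] : List String) then "Kitchen"
  else if ∃ o ∈ objects, PySem.Str.lower o = "bed" then "Bedroom"
  else if ∃ o ∈ objects, PySem.Str.lower o = "dining table" then "Dining Room"
  else if ∃ o ∈ objects, PySem.Str.lower o ∈ (["couch", "sofa", "tv", "chair"] : List String) then "Living Room"
  else if ∃ o ∈ objects, PySem.Str.lower o = "washing machine" then "Laundry"
  else "Unknown"

theorem interA_ne (objects kw : List String) :
    (PySem.Set.inter (PySem.Set.ofList (objects.map PySem.Str.lower)) (PySem.Set.ofList kw) ≠ []) ↔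
    ∃ o ∈ objects, PySem.Str.lower o ∈ kw := by
  rw [ne_eq, List.eq_nil_iff_forall_not_mem]
  constructor
  · intro h
    by_contra hc
    apply h
    intro x hx
    rw [PySem.Set.mem_inter, PySem.Set.mem_ofList, PySem.Set.mem_ofList, List.mem_map] at hx
    obtain ⟨⟨o, ho, rfl⟩, hk⟩ := hx
    exact hc ⟨o, ho, hk⟩
  · rintro ⟨o, ho, hk⟩ h
    exact h (PySem.Str.lower o)
      (by rw [PySem.Set.mem_inter, PySem.Set.mem_ofList, PySem.Set.mem_ofList, List.mem_map]
          exact ⟨⟨o, ho, rfl⟩, hk⟩)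

theorem A_char (objects : List String) : infer_room_type_py objects = roomCanon objects := by
  unfold infer_room_type_py roomCanon
  by_cases hnil : objects = []
  · subst hnil; simp
  · rw [if_neg hnil]
    simp only [interA_ne]
    simp only [List.mem_cons, List.not_mem_nil, or_false]

-- characterisation of the rank table on an arbitrary string
set_option maxRecDepth 10000 in
set_option maxHeartbeats 1000000 in
theorem rank_char (s : String) :
    rankDict.getD s 6 =
      (if s ∈ (["toilet", "sink", "bathtub", "toothbrush", "hair drier"] : List String) then 0
       else if s ∈ (["microwave", "oven", "refrigerator", "sink", "toaster", "knife", "spoon", "fork"] : List String) then 1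
       else if s = "bed" then 2
       else if s = "dining table" then 3
       else if s ∈ (["couch", "sofa", "tv", "chair"] : List String) then 4
       else if s = "washing machine" then 5
       else 6 : Int) := by
  have hmk : rankDict = PySem.Dict.mk [("toilet", 0), ("sink", 0), ("bathtub", 0), ("toothbrush", 0), ("hair drier", 0), ("microwave", 1), ("oven", 1), ("refrigerator", 1), ("toaster", 1), ("knife", 1), ("spoon", 1), ("fork", 1), ("bed", 2), ("dining table", 3), ("couch", 4), ("sofa", 4), ("tv", 4), ("chair", 4), ("washing machine", 5)] := by decide
  have hbase : (PySem.Dict.mk ([] : List (String × Int))).get? s = none := rfl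
  rw [hmk, PySem.Dict.getD_eq_get?_getD]
  simp only [PySem.Dict.get?_mk_cons, beq_iff_eq]
  by_cases h1 : "toilet" = s
  · rw [if_pos h1]; subst h1; decide
  · rw [if_neg h1]
    by_cases h2 : "sink" = s
    · rw [if_pos h2]; subst h2; decide
    · rw [if_neg h2]
      by_cases h3 : "bathtub" = s
      · rw [if_pos h3]; subst h3; decide
      · rw [if_neg h3]
        by_cases h4 : "toothbrush" = s
        · rw [if_pos h4]; subst h4; decide
        · rw [if_neg h4]
          by_cases h5 : "hair drier" = s
          · rw [if_pos h5]; subst h5; decide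
          · rw [if_neg h5]
            by_cases h6 : "microwave" = s
            · rw [if_pos h6]; subst h6; decide
            · rw [if_neg h6]
              by_cases h7 : "oven" = s
              · rw [if_pos h7]; subst h7; decide
              · rw [if_neg h7]
                by_cases h8 : "refrigerator" = s
                · rw [if_pos h8]; subst h8; decide
                · rw [if_neg h8]
                  by_cases h9 : "toaster" = s
                  · rw [if_pos h9]; subst h9; decide
                  · rw [if_neg h9]
                    by_cases h10 : "knife" = s
                    · rw [if_pos h10]; subst h10; decide
                    · rw [if_neg h10]
                      by_cases h11 : "spoon" = s
                      · rw [if_pos h11]; subst h11; decide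
                      · rw [if_neg h11]
                        by_cases h12 : "fork" = s
                        · rw [if_pos h12]; subst h12; decide
                        · rw [if_neg h12]
                          by_cases h13 : "bed" = s
                          · rw [if_pos h13]; subst h13; decide
                          · rw [if_neg h13]
                            by_cases h14 : "dining table" = s
                            · rw [if_pos h14]; subst h14; decide
                            · rw [if_neg h14]
                              by_cases h15 : "couch" = s
                              · rw [if_pos h15]; subst h15; decide
                              · rw [if_neg h15]
                                by_cases h16 : "sofa" = s
                                · rw [if_pos h16]; subst h16; decide
                                · rw [if_neg h16]
                                  by_cases h17 : "tv" = s
                                  · rw [if_pos h17]; subst h17; decide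
                                  · rw [if_neg h17]
                                    by_cases h18 : "chair" = s
                                    · rw [if_pos h18]; subst h18; decide
                                    · rw [if_neg h18]
                                      by_cases h19 : "washing machine" = s
                                      · rw [if_pos h19]; subst h19; decide
                                      · rw [if_neg h19]
                                        simp only [List.mem_cons, List.not_mem_nil, or_false]
                                        rw [if_neg (by push Not; exact ⟨Ne.symm h1, Ne.symm h2, Ne.symm h3, Ne.symm h4, Ne.symm h5⟩)]
                                        rw [if_neg (by push Not; exact ⟨Ne.symm h6, Ne.symm h7, Ne.symm h8, Ne.symm h2, Ne.symm h9, Ne.symm h10, Ne.symm h11, Ne.symm h12⟩)]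
                                        rw [if_neg (Ne.symm h13)]
                                        rw [if_neg (Ne.symm h14)]
                                        rw [if_neg (by push Not; exact ⟨Ne.symm h15, Ne.symm h16, Ne.symm h17, Ne.symm h18⟩)]
                                        rw [if_neg (Ne.symm h19)]
                                        simp [hbase]

theorem foldl_min_le (l : List String) (f : String → Int) (b k : Int) :
    l.foldl (fun a o => min a (f o)) b ≤ k ↔ b ≤ k ∨ ∃ o ∈ l, f o ≤ k := by
  induction l generalizing b with
  | nil => simp
  | cons a t ih =>
    simp only [List.foldl_cons, ih, List.mem_cons]
    constructor
    · rintro (h | ⟨o, ho, hf⟩)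
      · rcases min_le_iff.mp h with h' | h'
        · exact Or.inl h'
        · exact Or.inr ⟨a, Or.inl rfl, h'⟩
      · exact Or.inr ⟨o, Or.inr ho, hf⟩
    · rintro (h | ⟨o, (rfl | ho), hf⟩)
      · exact Or.inl (min_le_of_left_le h)
      · exact Or.inl (min_le_of_right_le hf)
      · exact Or.inr ⟨o, ho, hf⟩

theorem foldl_min_lb (l : List String) (f : String → Int) (b : Int)
    (hb : 0 ≤ b) (hf : ∀ o, 0 ≤ f o) :
    0 ≤ l.foldl (fun a o => min a (f o)) b := by
  induction l generalizing b with
  | nil => exact hb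
  | cons a t ih => exact ih _ (le_min hb (hf a))

theorem rank_nonneg (s : String) : 0 ≤ rankDict.getD s 6 := by
  rw [rank_char]; split_ifs <;> norm_num

theorem rank_le0 (s : String) : rankDict.getD s 6 ≤ 0 ↔ s ∈ (["toilet", "sink", "bathtub", "toothbrush", "hair drier"] : List String) := by
  rw [rank_char]; split_ifs <;> simp_all
theorem rank_le1 (s : String) : rankDict.getD s 6 ≤ 1 ↔ s ∈ (["toilet", "sink", "bathtub", "toothbrush", "hair drier"] : List String) ∨ s ∈ (["microwave", "oven", "refrigerator", "sink", "toaster", "knife", "spoon", "fork"] : List String) := by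
  rw [rank_char]; split_ifs <;> simp_all
theorem rank_le2 (s : String) : rankDict.getD s 6 ≤ 2 ↔ s ∈ (["toilet", "sink", "bathtub", "toothbrush", "hair drier"] : List String) ∨ s ∈ (["microwave", "oven", "refrigerator", "sink", "toaster", "knife", "spoon", "fork"] : List String) ∨ s = "bed" := by
  rw [rank_char]; split_ifs <;> simp_all
theorem rank_le3 (s : String) : rankDict.getD s 6 ≤ 3 ↔ s ∈ (["toilet", "sink", "bathtub", "toothbrush", "hair drier"] : List String) ∨ s ∈ (["microwave", "oven", "refrigerator", "sink", "toaster", "knife", "spoon", "fork"] : List String) ∨ s = "bed" ∨ s = "dining table" := by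
  rw [rank_char]; split_ifs <;> simp_all
theorem rank_le4 (s : String) : rankDict.getD s 6 ≤ 4 ↔ s ∈ (["toilet", "sink", "bathtub", "toothbrush", "hair drier"] : List String) ∨ s ∈ (["microwave", "oven", "refrigerator", "sink", "toaster", "knife", "spoon", "fork"] : List String) ∨ s = "bed" ∨ s = "dining table" ∨ s ∈ (["couch", "sofa", "tv", "chair"] : List String) := by
  rw [rank_char]; split_ifs <;> simp_all
theorem rank_le5 (s : String) : rankDict.getD s 6 ≤ 5 ↔ s ∈ (["toilet", "sink", "bathtub", "toothbrush", "hair drier"] : List String) ∨ s ∈ (["microwave", "oven", "refrigerator", "sink", "toaster", "knife", "spoon", "fork"] : List String) ∨ s = "bed" ∨ s = "dining table" ∨ s ∈ (["couch", "sofa", "tv", "chair"] : List String) ∨ s = "washing machine" := by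
  rw [rank_char]; split_ifs <;> simp_all

theorem B_char (objects : List String) : infer_room_type_py_alt objects = roomCanon objects := by
  show (PySem.List.pyGet? roomNames (objects.foldl (fun b o => min b (rankDict.getD (PySem.Str.lower o) 6)) 6)).getD "" = roomCanon objects
  set m := objects.foldl (fun b o => min b (rankDict.getD (PySem.Str.lower o) 6)) 6 with hm
  have hle := fun k => foldl_min_le objects (fun o => rankDict.getD (PySem.Str.lower o) 6) 6 k
  rw [← hm] at hle
  have hlb : 0 ≤ m := foldl_min_lb objects _ 6 (by norm_num) (fun o => rank_nonneg _)
  have hub : m ≤ 6 := (hle 6).mpr (Or.inl le_rfl)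
  have h0 : m ≤ 0 ↔ (∃ o ∈ objects, PySem.Str.lower o ∈ (["toilet", "sink", "bathtub", "toothbrush", "hair drier"] : List String)) := by
    rw [hle 0]
    simp only [rank_le0]
    norm_num
  have h1 : m ≤ 1 ↔ ((∃ o ∈ objects, PySem.Str.lower o ∈ (["toilet", "sink", "bathtub", "toothbrush", "hair drier"] : List String)) ∨ (∃ o ∈ objects, PySem.Str.lower o ∈ (["microwave", "oven", "refrigerator", "sink", "toaster", "knife", "spoon", "fork"] : List String))) := by
    rw [hle 1]
    simp only [rank_le1]
    constructor
    · rintro (h | ⟨o, ho, hr | hr⟩)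
      · norm_num at h
      · exact Or.inl ⟨o, ho, hr⟩
      · exact Or.inr ⟨o, ho, hr⟩
    · rintro (⟨o, ho, hr⟩ | ⟨o, ho, hr⟩)
      · exact Or.inr ⟨o, ho, Or.inl hr⟩
      · exact Or.inr ⟨o, ho, Or.inr hr⟩
  have h2 : m ≤ 2 ↔ ((∃ o ∈ objects, PySem.Str.lower o ∈ (["toilet", "sink", "bathtub", "toothbrush", "hair drier"] : List String)) ∨ (∃ o ∈ objects, PySem.Str.lower o ∈ (["microwave", "oven", "refrigerator", "sink", "toaster", "knife", "spoon", "fork"] : List String)) ∨ (∃ o ∈ objects, PySem.Str.lower o = "bed")) := by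
    rw [hle 2]
    simp only [rank_le2]
    constructor
    · rintro (h | ⟨o, ho, hr | hr | hr⟩)
      · norm_num at h
      · exact Or.inl ⟨o, ho, hr⟩
      · exact Or.inr (Or.inl ⟨o, ho, hr⟩)
      · exact Or.inr (Or.inr ⟨o, ho, hr⟩)
    · rintro (⟨o, ho, hr⟩ | ⟨o, ho, hr⟩ | ⟨o, ho, hr⟩)
      · exact Or.inr ⟨o, ho, Or.inl hr⟩
      · exact Or.inr ⟨o, ho, Or.inr (Or.inl hr)⟩
      · exact Or.inr ⟨o, ho, Or.inr (Or.inr hr)⟩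
  have h3 : m ≤ 3 ↔ ((∃ o ∈ objects, PySem.Str.lower o ∈ (["toilet", "sink", "bathtub", "toothbrush", "hair drier"] : List String)) ∨ (∃ o ∈ objects, PySem.Str.lower o ∈ (["microwave", "oven", "refrigerator", "sink", "toaster", "knife", "spoon", "fork"] : List String)) ∨ (∃ o ∈ objects, PySem.Str.lower o = "bed") ∨ (∃ o ∈ objects, PySem.Str.lower o = "dining table")) := by
    rw [hle 3]
    simp only [rank_le3]
    constructor
    · rintro (h | ⟨o, ho, hr | hr | hr | hr⟩)
      · norm_num at h
      · exact Or.inl ⟨o, ho, hr⟩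
      · exact Or.inr (Or.inl ⟨o, ho, hr⟩)
      · exact Or.inr (Or.inr (Or.inl ⟨o, ho, hr⟩))
      · exact Or.inr (Or.inr (Or.inr ⟨o, ho, hr⟩))
    · rintro (⟨o, ho, hr⟩ | ⟨o, ho, hr⟩ | ⟨o, ho, hr⟩ | ⟨o, ho, hr⟩)
      · exact Or.inr ⟨o, ho, Or.inl hr⟩
      · exact Or.inr ⟨o, ho, Or.inr (Or.inl hr)⟩
      · exact Or.inr ⟨o, ho, Or.inr (Or.inr (Or.inl hr))⟩
      · exact Or.inr ⟨o, ho, Or.inr (Or.inr (Or.inr hr))⟩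
  have h4 : m ≤ 4 ↔ ((∃ o ∈ objects, PySem.Str.lower o ∈ (["toilet", "sink", "bathtub", "toothbrush", "hair drier"] : List String)) ∨ (∃ o ∈ objects, PySem.Str.lower o ∈ (["microwave", "oven", "refrigerator", "sink", "toaster", "knife", "spoon", "fork"] : List String)) ∨ (∃ o ∈ objects, PySem.Str.lower o = "bed") ∨ (∃ o ∈ objects, PySem.Str.lower o = "dining table") ∨ (∃ o ∈ objects, PySem.Str.lower o ∈ (["couch", "sofa", "tv", "chair"] : List String))) := by
    rw [hle 4]
    simp only [rank_le4]
    constructor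
    · rintro (h | ⟨o, ho, hr | hr | hr | hr | hr⟩)
      · norm_num at h
      · exact Or.inl ⟨o, ho, hr⟩
      · exact Or.inr (Or.inl ⟨o, ho, hr⟩)
      · exact Or.inr (Or.inr (Or.inl ⟨o, ho, hr⟩))
      · exact Or.inr (Or.inr (Or.inr (Or.inl ⟨o, ho, hr⟩)))
      · exact Or.inr (Or.inr (Or.inr (Or.inr ⟨o, ho, hr⟩)))
    · rintro (⟨o, ho, hr⟩ | ⟨o, ho, hr⟩ | ⟨o, ho, hr⟩ | ⟨o, ho, hr⟩ | ⟨o, ho, hr⟩)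
      · exact Or.inr ⟨o, ho, Or.inl hr⟩
      · exact Or.inr ⟨o, ho, Or.inr (Or.inl hr)⟩
      · exact Or.inr ⟨o, ho, Or.inr (Or.inr (Or.inl hr))⟩
      · exact Or.inr ⟨o, ho, Or.inr (Or.inr (Or.inr (Or.inl hr)))⟩
      · exact Or.inr ⟨o, ho, Or.inr (Or.inr (Or.inr (Or.inr hr)))⟩
  have h5 : m ≤ 5 ↔ ((∃ o ∈ objects, PySem.Str.lower o ∈ (["toilet", "sink", "bathtub", "toothbrush", "hair drier"] : List String)) ∨ (∃ o ∈ objects, PySem.Str.lower o ∈ (["microwave", "oven", "refrigerator", "sink", "toaster", "knife", "spoon", "fork"] : List String)) ∨ (∃ o ∈ objects, PySem.Str.lower o = "bed") ∨ (∃ o ∈ objects, PySem.Str.lower o = "dining table") ∨ (∃ o ∈ objects, PySem.Str.lower o ∈ (["couch", "sofa", "tv", "chair"] : List String)) ∨ (∃ o ∈ objects, PySem.Str.lower o = "washing machine")) := by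
    rw [hle 5]
    simp only [rank_le5]
    constructor
    · rintro (h | ⟨o, ho, hr | hr | hr | hr | hr | hr⟩)
      · norm_num at h
      · exact Or.inl ⟨o, ho, hr⟩
      · exact Or.inr (Or.inl ⟨o, ho, hr⟩)
      · exact Or.inr (Or.inr (Or.inl ⟨o, ho, hr⟩))
      · exact Or.inr (Or.inr (Or.inr (Or.inl ⟨o, ho, hr⟩)))
      · exact Or.inr (Or.inr (Or.inr (Or.inr (Or.inl ⟨o, ho, hr⟩))))
      · exact Or.inr (Or.inr (Or.inr (Or.inr (Or.inr ⟨o, ho, hr⟩))))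
    · rintro (⟨o, ho, hr⟩ | ⟨o, ho, hr⟩ | ⟨o, ho, hr⟩ | ⟨o, ho, hr⟩ | ⟨o, ho, hr⟩ | ⟨o, ho, hr⟩)
      · exact Or.inr ⟨o, ho, Or.inl hr⟩
      · exact Or.inr ⟨o, ho, Or.inr (Or.inl hr)⟩
      · exact Or.inr ⟨o, ho, Or.inr (Or.inr (Or.inl hr))⟩
      · exact Or.inr ⟨o, ho, Or.inr (Or.inr (Or.inr (Or.inl hr)))⟩
      · exact Or.inr ⟨o, ho, Or.inr (Or.inr (Or.inr (Or.inr (Or.inl hr))))⟩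
      · exact Or.inr ⟨o, ho, Or.inr (Or.inr (Or.inr (Or.inr (Or.inr hr))))⟩
  unfold roomCanon
  by_cases hC0 : ∃ o ∈ objects, PySem.Str.lower o ∈ (["toilet", "sink", "bathtub", "toothbrush", "hair drier"] : List String)
  · have : m = 0 := le_antisymm (h0.mpr hC0) hlb
    rw [this, if_pos hC0]
    decide
  · rw [if_neg hC0]
    by_cases hC1 : ∃ o ∈ objects, PySem.Str.lower o ∈ (["microwave", "oven", "refrigerator", "sink", "toaster", "knife", "spoon", "fork"] : List String)
    · have ha : m ≤ 1 := h1.mpr (Or.inr hC1)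
      have hb : ¬ m ≤ 0 := fun h => hC0 (h0.mp h)
      have : m = 1 := by omega
      rw [this, if_pos hC1]
      decide
    · rw [if_neg hC1]
      by_cases hC2 : ∃ o ∈ objects, PySem.Str.lower o = "bed"
      · have ha : m ≤ 2 := h2.mpr (Or.inr (Or.inr hC2))
        have hb : ¬ m ≤ 1 := fun h => (h1.mp h).elim hC0 hC1
        have : m = 2 := by omega
        rw [this, if_pos hC2]
        decide
      · rw [if_neg hC2]
        by_cases hC3 : ∃ o ∈ objects, PySem.Str.lower o = "dining table"
        · have ha : m ≤ 3 := h3.mpr (Or.inr (Or.inr (Or.inr hC3)))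
          have hb : ¬ m ≤ 2 := fun h => (h2.mp h).elim hC0 (fun h' => h'.elim hC1 hC2)
          have : m = 3 := by omega
          rw [this, if_pos hC3]
          decide
        · rw [if_neg hC3]
          by_cases hC4 : ∃ o ∈ objects, PySem.Str.lower o ∈ (["couch", "sofa", "tv", "chair"] : List String)
          · have ha : m ≤ 4 := h4.mpr (Or.inr (Or.inr (Or.inr (Or.inr hC4))))
            have hb : ¬ m ≤ 3 := fun h => (h3.mp h).elim hC0 (fun h' => h'.elim hC1 (fun h'' => h''.elim hC2 hC3))
            have : m = 4 := by omega
            rw [this, if_pos hC4]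
            decide
          · rw [if_neg hC4]
            by_cases hC5 : ∃ o ∈ objects, PySem.Str.lower o = "washing machine"
            · have ha : m ≤ 5 := h5.mpr (Or.inr (Or.inr (Or.inr (Or.inr (Or.inr hC5)))))
              have hb : ¬ m ≤ 4 := fun h => (h4.mp h).elim hC0 (fun h' => h'.elim hC1 (fun h'' => h''.elim hC2 (fun h3' => h3'.elim hC3 hC4)))
              have : m = 5 := by omega
              rw [this, if_pos hC5]
              decide
            · rw [if_neg hC5]
              have hb : ¬ m ≤ 5 := fun h => (h5.mp h).elim hC0 (fun h' => h'.elim hC1 (fun h'' => h''.elim hC2 (fun h3' => h3'.elim hC3 (fun h4' => h4'.elim hC4 hC5))))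
              have : m = 6 := by omega
              rw [this]
              decide

-- ===== VERDICT (by name: the statement is the Claim_ definition above) =====
theorem infer_room_type_py_spec : Claim_equal_infer_room_type_py := by
  intro objects _
  unfold Spec_infer_room_type_py
  rw [A_char, B_char]
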